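-- pv_equiv track=rewrite | github.com/dancasmor/Bio-inspired-spike-based-Hippocampus-and-Posterior-Parietal-Cortex-robotic-system-for-pseudo-mapping | real_time_map_and_nav_app.py | manhattan_nearest_cell_to_target
-- ===== SOURCE A (Python) =====
-- def manhattan_nearest_cell_to_target(target, cells):
--     nearestCells = None
--     nearestDistance = -1
--     # For each cell
--     for cell in cells:
--         distance = abs(cell[0] - target[0]) + abs(cell[1] - target[1])
--         # Compare and choose the nearest and set of nearest
--         if nearestDistance == -1 or distance <= nearestDistance:
--             if distance == nearestDistance:
--                 nearestCells.append(cell)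
--             else:
--                 nearestCells = [cell]
--             nearestDistance = distance
--     return nearestCells
-- ===== SOURCE B (Python) =====
-- def manhattan_nearest_cell_to_target(target, cells):
--     m = min(abs(c[0] - target[0]) + abs(c[1] - target[1]) for c in cells)
--     return [c for c in cells if abs(c[0] - target[0]) + abs(c[1] - target[1]) == m]
-- ===== Notes on version B (the rewrite author's own statement) =====
-- stated objective: simpler
-- what changed: Replaces the single-pass min-tracking loop with mutable nearestCells/nearestDistance state by a reduce-then-filter decomposition: compute the minimum Manhattan distance, then filter the cells at that distance in original order.
-- outside the precondition, e.g. on manhattan_nearest_cell_to_target((0, 0), []): A returns None, B raises ValueError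
import Mathlib
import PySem

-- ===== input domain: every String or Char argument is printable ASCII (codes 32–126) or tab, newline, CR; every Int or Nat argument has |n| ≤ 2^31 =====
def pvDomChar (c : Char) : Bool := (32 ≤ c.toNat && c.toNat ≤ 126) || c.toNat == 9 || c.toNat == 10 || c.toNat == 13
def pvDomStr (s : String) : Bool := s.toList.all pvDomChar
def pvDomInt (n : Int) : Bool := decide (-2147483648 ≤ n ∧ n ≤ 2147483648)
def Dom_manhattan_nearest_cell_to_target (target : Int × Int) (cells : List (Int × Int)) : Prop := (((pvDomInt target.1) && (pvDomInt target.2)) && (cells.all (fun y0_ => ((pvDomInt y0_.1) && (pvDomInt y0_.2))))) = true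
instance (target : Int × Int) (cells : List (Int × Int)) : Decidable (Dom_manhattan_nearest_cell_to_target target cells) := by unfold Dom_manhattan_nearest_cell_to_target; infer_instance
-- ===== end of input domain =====

-- B replaces A's single-pass min-tracking loop (mutable nearestCells/nearestDistance) by a
-- reduce-then-filter decomposition (min of the distances, then filter); same O(n) cost.

-- Manhattan distance, shared helper (both Pythons compute this expression inline)
def pvDist (target cell : Int × Int) : Int := |cell.1 - target.1| + |cell.2 - target.2|

-- ===== PORT A =====
-- loop body of A: state = (nearestCells : Option list, nearestDistance)
def pvStepA (target : Int × Int) (st : Option (List (Int × Int)) × Int) (cell : Int × Int) :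
    Option (List (Int × Int)) × Int :=
  let distance := pvDist target cell
  if st.2 = -1 ∨ distance ≤ st.2 then
    if distance = st.2 then (Option.map (fun l => l ++ [cell]) st.1, distance)
    else (some [cell], distance)
  else st

def manhattan_nearest_cell_to_target (target : Int × Int) (cells : List (Int × Int)) : List (Int × Int) :=
  ((cells.foldl (pvStepA target) (none, -1)).1).getD []  -- Python returns None when cells = []; excluded by Pre_

-- ===== PORT B =====
def manhattan_nearest_cell_to_target_alt (target : Int × Int) (cells : List (Int × Int)) : List (Int × Int) :=
  match PySem.List.min? (cells.map (pvDist target)) (fun x => x) with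
  | none => []  -- Python B raises ValueError here (cells = [], outside Pre_)
  | some m => cells.filter (fun c => pvDist target c == m)

-- ===== PRECONDITION & SPEC =====
-- Pre_ excludes only the empty cell list, on which A returns None (not a list) and B raises ValueError.
def Pre_manhattan_nearest_cell_to_target (target : Int × Int) (cells : List (Int × Int)) : Prop := cells ≠ []
instance (target : Int × Int) (cells : List (Int × Int)) : Decidable (Pre_manhattan_nearest_cell_to_target target cells) := by unfold Pre_manhattan_nearest_cell_to_target; infer_instance
def pvWitness_manhattan_nearest_cell_to_target : (Int × Int) × (List (Int × Int)) := ((0, 0), [(1, 2), (2, 1), (0, 5)])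

def Spec_manhattan_nearest_cell_to_target (target : Int × Int) (cells : List (Int × Int)) (out : List (Int × Int)) : Prop := out = manhattan_nearest_cell_to_target_alt target cells
instance (target : Int × Int) (cells : List (Int × Int)) (out : List (Int × Int)) : Decidable (Spec_manhattan_nearest_cell_to_target target cells out) := by unfold Spec_manhattan_nearest_cell_to_target; infer_instance

-- ===== CLAIM (what is proved, stated in full; the proofs are below) =====
def Claim_equal_manhattan_nearest_cell_to_target : Prop := ∀ (target : Int × Int) (cells : List (Int × Int)), Dom_manhattan_nearest_cell_to_target target cells → Pre_manhattan_nearest_cell_to_target target cells → Spec_manhattan_nearest_cell_to_target target cells (manhattan_nearest_cell_to_target target cells)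

-- ===== LEMMAS AND PROOFS =====

lemma pvDist_nonneg (t c : Int × Int) : 0 ≤ pvDist t c := by
  unfold pvDist
  have := abs_nonneg (c.1 - t.1)
  have := abs_nonneg (c.2 - t.2)
  omega

/-- Loop invariant: from a state holding the filter of the already-seen cells and their minimum
distance `m` (with every seen cell at distance ≥ m), A's loop produces the filter of all cells
at the overall minimum. -/
lemma pvLoop_inv (target : Int × Int) :
    ∀ (rest done : List (Int × Int)) (m : Int), 0 ≤ m →
    (∀ x ∈ done, m ≤ pvDist target x) →
    rest.foldl (pvStepA target) (some (done.filter (fun c => pvDist target c == m)), m)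
      = (some ((done ++ rest).filter
            (fun c => pvDist target c == ((rest.map (pvDist target)).foldl min m))),
          (rest.map (pvDist target)).foldl min m) := by
  intro rest
  induction rest with
  | nil => intro done m _ _; simp
  | cons c r ih =>
    intro done m hm hdone
    have hd0 := pvDist_nonneg target c
    by_cases hlt : pvDist target c < m
    · -- strictly closer: restart the accumulator
      have hstep : pvStepA target (some (done.filter (fun c => pvDist target c == m)), m) c
          = (some [c], pvDist target c) := by
        simp only [pvStepA]
        split_ifs with h1 h2
        · exact absurd h2 (by omega)
        · rfl
        · exact absurd (Or.inr (by omega : pvDist target c ≤ m)) h1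
      have hfc : [c] = ((done ++ [c]).filter (fun x => pvDist target x == pvDist target c)) := by
        have : done.filter (fun x => pvDist target x == pvDist target c) = [] := by
          apply List.filter_eq_nil_iff.mpr
          intro x hx
          have := hdone x hx
          simp; omega
        simp [List.filter_append, this]
      have := ih (done ++ [c]) (pvDist target c) hd0
        (by intro x hx
            rcases List.mem_append.mp hx with h | h
            · exact le_of_lt (lt_of_lt_of_le hlt (hdone x h))
            · simp at h; subst h; exact le_refl _)
      rw [List.foldl_cons, hstep]
      rw [hfc, this]
      have hmin : min m (pvDist target c) = pvDist target c := by omega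
      simp [List.append_assoc, hmin]
    · by_cases heq : pvDist target c = m
      · -- tie: append
        have hstep : pvStepA target (some (done.filter (fun c => pvDist target c == m)), m) c
            = (some (done.filter (fun c => pvDist target c == m) ++ [c]), m) := by
          simp only [pvStepA]
          split_ifs with h1
          · simp [heq]
          · exact absurd (Or.inr (by omega : pvDist target c ≤ m)) h1
        have hfc : done.filter (fun x => pvDist target x == m) ++ [c]
            = (done ++ [c]).filter (fun x => pvDist target x == m) := by
          simp [List.filter_append, heq]
        have := ih (done ++ [c]) m hm
          (by intro x hx
              rcases List.mem_append.mp hx with h | h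
              · exact hdone x h
              · simp at h; subst h; omega)
        rw [List.foldl_cons, hstep, hfc, this]
        have hmin : min m (pvDist target c) = m := by omega
        simp [List.append_assoc, hmin]
      · -- farther: state unchanged
        have hgt : m < pvDist target c := by omega
        have hstep : pvStepA target (some (done.filter (fun c => pvDist target c == m)), m) c
            = (some (done.filter (fun c => pvDist target c == m)), m) := by
          simp only [pvStepA]
          split_ifs with h1
          · exfalso; rcases h1 with h | h <;> omega
          · rfl
        have hfc : done.filter (fun x => pvDist target x == m)
            = (done ++ [c]).filter (fun x => pvDist target x == m) := by
          simp [List.filter_append]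
          omega
        have := ih (done ++ [c]) m hm
          (by intro x hx
              rcases List.mem_append.mp hx with h | h
              · exact hdone x h
              · simp at h; subst h; omega)
        rw [List.foldl_cons, hstep, hfc, this]
        have hmin : min m (pvDist target c) = m := by omega
        simp [List.append_assoc, hmin]

-- ===== VERDICT (by name: the statement is the Claim_ definition above) =====
theorem manhattan_nearest_cell_to_target_spec : Claim_equal_manhattan_nearest_cell_to_target := by
  intro target cells _ hpre
  unfold Spec_manhattan_nearest_cell_to_target
  match cells with
  | [] => exact absurd rfl hpre
  | c :: rest =>
    have hd0 := pvDist_nonneg target c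
    have hfirst : pvStepA target (none, -1) c = (some [c], pvDist target c) := by
      simp only [pvStepA]
      split_ifs with h1 h2
      · exact absurd h2 (by omega)
      · rfl
      · exact absurd (Or.inl trivial) h1
    have hinv := pvLoop_inv target rest [c] (pvDist target c) hd0 (by simp)
    unfold manhattan_nearest_cell_to_target manhattan_nearest_cell_to_target_alt
    rw [List.foldl_cons, hfirst]
    rw [show (some [c] : Option (List (Int × Int))) = some ([c].filter (fun x => pvDist target x == pvDist target c)) by simp]
    rw [hinv]
    rw [List.map_cons, PySem.List.min?_id_cons]
    simp
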